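-- pv_equiv track=rewrite | github.com/nishat123456/ugs-2026-tinyml-acoustic | tinyml-acoustic/pipeline.py | buffer_indices
-- ===== SOURCE A (Python) =====
-- def buffer_indices(y_pred, total_clips, B):
--     """Compute saved clip indices for circular buffer with pre/post context = B clips."""
--     saved = set()
--     for i, p in enumerate(y_pred):
--         if p == 1:
--             for offset in range(-B, B + 1):
--                 idx = i + offset
--                 if 0 <= idx < total_clips:
--                     saved.add(idx)
--     return saved
-- ===== SOURCE B (Python) =====
-- def buffer_indices(y_pred, total_clips, B):
--     """Compute saved clip indices for circular buffer with pre/post context = B clips."""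
--     out = []
--     nxt = 0  # 1 + largest index saved so far (0 if none)
--     for i, p in enumerate(y_pred):
--         if p == 1:
--             lo = max(0, i - B)
--             hi = min(total_clips - 1, i + B)
--             start = max(lo, nxt)
--             if start <= hi:
--                 out.extend(range(start, hi + 1))
--                 nxt = hi + 1
--     return set(out)
-- ===== Notes on version B (the rewrite author's own statement) =====
-- stated objective: alternative
-- what changed: Instead of scanning all 2B+1 offsets around every positive prediction and testing set membership for each, B sweeps once keeping a next-uncovered-index pointer and appends each covered index exactly once (interval union); it avoids per-offset membership tests at the cost of the pointer bookkeeping.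
import Mathlib
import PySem

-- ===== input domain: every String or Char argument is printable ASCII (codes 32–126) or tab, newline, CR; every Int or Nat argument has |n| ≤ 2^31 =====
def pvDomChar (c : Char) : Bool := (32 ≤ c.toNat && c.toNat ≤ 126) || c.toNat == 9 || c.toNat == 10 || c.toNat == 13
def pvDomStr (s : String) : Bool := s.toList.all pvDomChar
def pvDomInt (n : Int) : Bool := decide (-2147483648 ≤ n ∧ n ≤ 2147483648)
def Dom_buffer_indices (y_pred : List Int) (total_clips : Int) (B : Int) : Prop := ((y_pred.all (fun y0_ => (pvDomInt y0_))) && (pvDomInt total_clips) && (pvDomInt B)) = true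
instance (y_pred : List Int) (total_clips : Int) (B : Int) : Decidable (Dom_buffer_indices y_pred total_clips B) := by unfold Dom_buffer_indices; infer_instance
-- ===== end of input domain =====

-- B replaces A's per-prediction scan of all 2B+1 offsets (with a membership test per offset) by a
-- single sweep with a 'next uncovered index' pointer that appends each covered index exactly once
-- (interval union): objective = alternative algorithm, same measured cost on the timed inputs.

-- ===== PORT A =====
def buffer_indices (y_pred : List Int) (total_clips : Int) (B : Int) : List Int :=
  (PySem.List.enumerate y_pred).foldl
    (fun (saved : PySem.Set Int) ip =>
      if ip.2 = 1 then
        (PySem.List.pyRange (-B) (B + 1) 1).foldl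
          (fun s offset =>
            let idx := ip.1 + offset
            if 0 ≤ idx ∧ idx < total_clips then PySem.Set.add s idx else s)
          saved
      else saved)
    PySem.Set.empty

-- ===== PORT B =====
def buffer_indices_alt (y_pred : List Int) (total_clips : Int) (B : Int) : List Int :=
  PySem.Set.ofList
    ((PySem.List.enumerate y_pred).foldl
      (fun (st : List Int × Int) ip =>
        if ip.2 = 1 then
          let lo := max 0 (ip.1 - B)
          let hi := min (total_clips - 1) (ip.1 + B)
          let start := max lo st.2
          if start ≤ hi then (st.1 ++ PySem.List.pyRange start (hi + 1) 1, hi + 1)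
          else st
        else st)
      ([], 0)).1

-- ===== PRECONDITION & SPEC =====
def Spec_buffer_indices (y_pred : List Int) (total_clips : Int) (B : Int) (out : List Int) : Prop := out = buffer_indices_alt y_pred total_clips B
instance (y_pred : List Int) (total_clips : Int) (B : Int) (out : List Int) : Decidable (Spec_buffer_indices y_pred total_clips B out) := by unfold Spec_buffer_indices; infer_instance

-- ===== CLAIM (what is proved, stated in full; the proofs are below) =====
def Claim_equal_buffer_indices : Prop := ∀ (y_pred : List Int) (total_clips : Int) (B : Int), Dom_buffer_indices y_pred total_clips B → Spec_buffer_indices y_pred total_clips B (buffer_indices y_pred total_clips B)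

-- ===== LEMMAS AND PROOFS =====

-- Set.update is a no-op on elements already present.
theorem set_update_of_subset (s : PySem.Set Int) (xs : List Int)
    (h : ∀ x ∈ xs, x ∈ s) : PySem.Set.update s xs = s := by
  induction xs generalizing s with
  | nil => rfl
  | cons x xs ih =>
      rw [PySem.Set.update_cons, PySem.Set.add_of_mem (h x (by simp))]
      exact ih s (fun y hy => h y (by simp [hy]))

-- A's inner offset loop clamps the window [i+a, i+b) to [0, tc) and inserts it into the set.
theorem innerA (tc i : Int) : ∀ (n : Nat) (a b : Int), (b - a).toNat = n →
    ∀ s : PySem.Set Int,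
    (PySem.List.pyRange a b 1).foldl
      (fun s offset =>
        let idx := i + offset
        if 0 ≤ idx ∧ idx < tc then PySem.Set.add s idx else s) s
    = PySem.Set.update s (PySem.List.pyRange (max 0 (i + a)) (min tc (i + b)) 1) := by
  intro n
  induction n with
  | zero =>
      intro a b hn s
      have hba : b ≤ a := by omega
      rw [PySem.List.pyRange_one_eq_nil hba,
          PySem.List.pyRange_one_eq_nil (by omega : min tc (i + b) ≤ max 0 (i + a))]
      rfl
  | succ n ih =>
      intro a b hn s
      have hab : a < b := by omega
      rw [PySem.List.pyRange_one_cons hab]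
      simp only [List.foldl_cons]
      by_cases hc : 0 ≤ i + a ∧ i + a < tc
      · rw [if_pos hc]
        rw [ih (a + 1) b (by omega) (PySem.Set.add s (i + a))]
        have h1 : max 0 (i + a) = i + a := by omega
        have h2 : max 0 (i + (a + 1)) = i + a + 1 := by omega
        have h3 : i + a < min tc (i + b) := by omega
        rw [h1, PySem.List.pyRange_one_cons h3, PySem.Set.update_cons, h2]
      · rw [if_neg hc]
        rw [ih (a + 1) b (by omega) s]
        by_cases hneg : i + a < 0
        · have : max 0 (i + a) = max 0 (i + (a + 1)) := by omega
          rw [this]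
        · have htc : tc ≤ i + a := by omega
          rw [PySem.List.pyRange_one_eq_nil (by omega : min tc (i + b) ≤ max 0 (i + (a + 1))),
              PySem.List.pyRange_one_eq_nil (by omega : min tc (i + b) ≤ max 0 (i + a))]

-- Main loop invariant: A's set equals B's list; every saved index is < nxt; and below nxt
-- everything from some lo ≤ max 0 (k - B) is saved (so future windows never re-add below nxt).
theorem loop (tc B : Int) (ys : List Int) : ∀ (k : Int) (out : List Int) (nxt : Int),
    0 ≤ nxt → out.Nodup → (∀ x ∈ out, x < nxt) →
    (0 < nxt → ∃ lo, lo ≤ max 0 (k - B) ∧ ∀ x, lo ≤ x → x < nxt → x ∈ out) →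
    ((PySem.List.enumerate ys k).foldl
       (fun (saved : PySem.Set Int) ip =>
         if ip.2 = 1 then
           (PySem.List.pyRange (-B) (B + 1) 1).foldl
             (fun s offset =>
               let idx := ip.1 + offset
               if 0 ≤ idx ∧ idx < tc then PySem.Set.add s idx else s)
             saved
         else saved) out
     = ((PySem.List.enumerate ys k).foldl
         (fun (st : List Int × Int) ip =>
           if ip.2 = 1 then
             let lo := max 0 (ip.1 - B)
             let hi := min (tc - 1) (ip.1 + B)
             let start := max lo st.2
             if start ≤ hi then (st.1 ++ PySem.List.pyRange start (hi + 1) 1, hi + 1)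
             else st
           else st) (out, nxt)).1)
    ∧ ((PySem.List.enumerate ys k).foldl
         (fun (st : List Int × Int) ip =>
           if ip.2 = 1 then
             let lo := max 0 (ip.1 - B)
             let hi := min (tc - 1) (ip.1 + B)
             let start := max lo st.2
             if start ≤ hi then (st.1 ++ PySem.List.pyRange start (hi + 1) 1, hi + 1)
             else st
           else st) (out, nxt)).1.Nodup := by
  induction ys with
  | nil => intro k out nxt _ hnd _ _; simp [PySem.List.enumerate_nil]; exact hnd
  | cons y ys ih =>
      intro k out nxt hnxt hnd hlt hcov
      rw [PySem.List.enumerate_cons]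
      simp only [List.foldl_cons]
      by_cases hy : y = 1
      · rw [if_pos hy, if_pos hy]
        -- A's step: insert the clamped window
        rw [innerA tc k _ (-B) (B + 1) rfl out]
        have hminmax : min tc (k + (B + 1)) = min (tc - 1) (k + B) + 1 := by omega
        set lo := max 0 (k - B) with hlo
        set hi := min (tc - 1) (k + B) with hhi
        have hka : max 0 (k + -B) = lo := by omega
        rw [hka, hminmax]
        set start := max lo nxt with hstart
        by_cases hse : start ≤ hi
        · rw [if_pos hse]
          -- below start everything in the window is already saved
          have hmemlow : ∀ x ∈ PySem.List.pyRange lo start 1, x ∈ out := by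
            intro x hx
            rw [PySem.List.mem_pyRange_one] at hx
            have hxn : x < nxt := by omega
            have hp : 0 < nxt := by omega
            obtain ⟨l0, hl0, hcv⟩ := hcov hp
            exact hcv x (by omega) hxn
          have hsplit : PySem.List.pyRange lo (hi + 1) 1
              = PySem.List.pyRange lo start 1 ++ PySem.List.pyRange start (hi + 1) 1 :=
            PySem.List.pyRange_one_append lo start (hi + 1) (by omega) (by omega)
          have hdisj : ∀ x ∈ PySem.List.pyRange start (hi + 1) 1, x ∉ out := by
            intro x hx hmem
            rw [PySem.List.mem_pyRange_one] at hx
            have := hlt x hmem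
            omega
          rw [hsplit, PySem.Set.update_append, set_update_of_subset out _ hmemlow,
              PySem.Set.update_eq_append_of_disjoint out _ (PySem.List.nodup_pyRange_one _ _) hdisj]
          -- recurse with the new state
          have hnd' : (out ++ PySem.List.pyRange start (hi + 1) 1).Nodup := by
            refine List.Nodup.append hnd (PySem.List.nodup_pyRange_one _ _) ?_
            intro x hx hx'
            exact hdisj x hx' hx
          refine ih (k + 1) (out ++ PySem.List.pyRange start (hi + 1) 1) (hi + 1)
            (by omega) hnd' ?_ ?_
          · intro x hx
            rcases List.mem_append.mp hx with h | h
            · have := hlt x h; omega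
            · rw [PySem.List.mem_pyRange_one] at h; omega
          · intro _
            refine ⟨lo, by omega, ?_⟩
            intro x hx hx'
            rcases lt_or_ge x start with h | h
            · have hp : 0 < nxt := by omega
              obtain ⟨l0, hl0, hcv⟩ := hcov hp
              exact List.mem_append.mpr (Or.inl (hcv x (by omega) (by omega)))
            · exact List.mem_append.mpr (Or.inr (PySem.List.mem_pyRange_one.mpr ⟨h, hx'⟩))
        · rw [if_neg hse]
          -- the whole window is already saved: A's update is a no-op
          have hsub : ∀ x ∈ PySem.List.pyRange lo (hi + 1) 1, x ∈ out := by
            intro x hx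
            rw [PySem.List.mem_pyRange_one] at hx
            have hxn : x < nxt := by omega
            have hp : 0 < nxt := by omega
            obtain ⟨l0, hl0, hcv⟩ := hcov hp
            exact hcv x (by omega) hxn
          rw [set_update_of_subset out _ hsub]
          refine ih (k + 1) out nxt hnxt hnd hlt ?_
          intro hp
          obtain ⟨l0, hl0, hcv⟩ := hcov hp
          exact ⟨l0, by omega, hcv⟩
      · rw [if_neg hy, if_neg hy]
        refine ih (k + 1) out nxt hnxt hnd hlt ?_
        intro hp
        obtain ⟨l0, hl0, hcv⟩ := hcov hp
        exact ⟨l0, by omega, hcv⟩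

-- ===== VERDICT (by name: the statement is the Claim_ definition above) =====
theorem buffer_indices_spec : Claim_equal_buffer_indices := by
  intro y_pred tc B _
  unfold Spec_buffer_indices buffer_indices buffer_indices_alt
  obtain ⟨heq, hnd⟩ := loop tc B y_pred 0 [] 0 le_rfl List.nodup_nil
    (by intro x hx; simp at hx) (by intro h; omega)
  rw [PySem.Set.ofList_eq_self_of_nodup _ hnd]
  exact heq
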